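-- pv_equiv track=rewrite | github.com/aiappsgbb/pulse-agent | src/tui/screens.py | _consolidate_jobs
-- ===== SOURCE A (Python) =====
-- def _consolidate_jobs(events: list[dict]) -> list[dict]:
--     """Consolidate raw job events into one entry per job (latest status wins).
--
--     Returns list of job dicts sorted: running first, then by timestamp desc.
--     """
--     jobs: dict[str, dict] = {}
--     for ev in events:
--         jid = ev.get("job_id", "")
--         if not jid:
--             continue
--         existing = jobs.get(jid)
--         if existing is None:
--             jobs[jid] = {
--                 "job_id": jid,
--                 "job_type": ev.get("job_type", "?"),
--                 "status": ev.get("status", "?"),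
--                 "detail": ev.get("detail", ""),
--                 "log_file": ev.get("log_file", ""),
--                 "ts": ev.get("ts", ""),
--                 "started_ts": ev.get("ts", "") if ev.get("status") == "running" else "",
--             }
--         else:
--             # Update with later event
--             existing["status"] = ev.get("status", existing["status"])
--             existing["detail"] = ev.get("detail") or existing["detail"]
--             existing["log_file"] = ev.get("log_file") or existing["log_file"]
--             existing["ts"] = ev.get("ts", existing["ts"])
--             if ev.get("status") == "running":
--                 existing["started_ts"] = ev.get("ts", "")
--
--     result = list(jobs.values())
--     # Sort: running first, then most recent
--     running = [j for j in result if j["status"] == "running"]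
--     others = [j for j in result if j["status"] != "running"]
--     others.sort(key=lambda j: j.get("ts", ""), reverse=True)
--     return running + others
-- ===== SOURCE B (Python) =====
-- def _last_value(group, key):
--     """Value of key in the last event of group that has it, else None."""
--     for ev in reversed(group):
--         if key in ev:
--             return ev[key]
--     return None
--
--
-- def _last_truthy(group, key):
--     """Last non-empty value of key in group, else ''."""
--     for ev in reversed(group):
--         v = ev.get(key)
--         if v:
--             return v
--     return ""
--
--
-- def _started_ts(group):
--     """ts of the last 'running' event of group, else ''."""
--     for ev in reversed(group):
--         if ev.get("status") == "running":
--             return ev.get("ts", "")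
--     return ""
--
--
-- def _consolidate_jobs(events: list) -> list:
--     # Distinct non-empty job ids, in first-encounter order.
--     order = []
--     for ev in events:
--         jid = ev.get("job_id", "")
--         if jid and jid not in order:
--             order.append(jid)
--     # For each job, derive every field directly from its event list by
--     # scanning from the latest event backwards (latest value wins).
--     result = []
--     for jid in order:
--         group = [ev for ev in events if ev.get("job_id", "") == jid]
--         status = _last_value(group, "status")
--         ts = _last_value(group, "ts")
--         result.append({
--             "job_id": jid,
--             "job_type": group[0].get("job_type", "?"),
--             "status": status if status is not None else "?",
--             "detail": _last_truthy(group, "detail"),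
--             "log_file": _last_truthy(group, "log_file"),
--             "ts": ts if ts is not None else "",
--             "started_ts": _started_ts(group),
--         })
--     running = [j for j in result if j["status"] == "running"]
--     others = sorted((j for j in result if j["status"] != "running"),
--                     key=lambda j: j["ts"], reverse=True)
--     return running + others
-- ===== Notes on version B (the rewrite author's own statement) =====
-- stated objective: alternative
-- what changed: B drops A's incrementally-updated job dict entirely: it collects the distinct job ids in order, then computes each output field directly by scanning that job's events from the latest backwards (last status/ts present, last non-empty detail/log_file, ts of the last running event), keeping the running-first/ts-descending ordering.
import Mathlib
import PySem

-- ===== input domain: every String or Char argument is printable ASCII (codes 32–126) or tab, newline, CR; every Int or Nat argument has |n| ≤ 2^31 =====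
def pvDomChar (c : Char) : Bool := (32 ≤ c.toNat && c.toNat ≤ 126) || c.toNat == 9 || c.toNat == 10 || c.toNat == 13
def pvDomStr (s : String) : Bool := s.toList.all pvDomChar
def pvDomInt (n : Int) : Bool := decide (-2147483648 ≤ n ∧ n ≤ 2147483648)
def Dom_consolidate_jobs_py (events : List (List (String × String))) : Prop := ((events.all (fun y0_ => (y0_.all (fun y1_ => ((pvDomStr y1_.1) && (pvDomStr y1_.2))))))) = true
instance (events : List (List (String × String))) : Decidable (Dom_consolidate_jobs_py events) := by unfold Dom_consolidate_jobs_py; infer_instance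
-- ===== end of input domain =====

-- B discards A's incrementally-updated job dict: it lists the distinct job ids, then
-- derives each output field directly by scanning that job's events latest-first.
-- Objective: alternative decomposition; return values proved equal on all inputs.

-- ===== PORT A =====
-- ev.get(k): an event dict is an association list; first-match lookup (shared by both ports).
def pvEvGet? (ev : List (String × String)) (k : String) : Option String :=
  (PySem.Dict.mk ev).get? k

-- ev.get("job_id", "") — the expression both Pythons use to read the id.
def pvKey (ev : List (String × String)) : String := (pvEvGet? ev "job_id").getD ""

-- the dict literal built when jid is seen first (keys distinct, in Python's literal order)
def pvAInit (jid : String) (ev : List (String × String)) : PySem.Dict String String :=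
  PySem.Dict.mk
    [("job_id", jid),
     ("job_type", (pvEvGet? ev "job_type").getD "?"),
     ("status", (pvEvGet? ev "status").getD "?"),
     ("detail", (pvEvGet? ev "detail").getD ""),
     ("log_file", (pvEvGet? ev "log_file").getD ""),
     ("ts", (pvEvGet? ev "ts").getD ""),
     ("started_ts", if pvEvGet? ev "status" = some "running" then (pvEvGet? ev "ts").getD "" else "")]

-- the in-place update of an existing job dict; insert overwrites keeping position.
-- `ev.get("detail") or …`: None and "" are both falsy, so `(pvEvGet? …).getD "" = ""` is
-- exactly the falsy case. existing["k"] is read with getD "": the key is always present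
-- on every dict A stores, so this is exact.
def pvAUpd (existing : PySem.Dict String String) (ev : List (String × String)) : PySem.Dict String String :=
  let e1 := existing.insert "status" ((pvEvGet? ev "status").getD (existing.getD "status" ""))
  let dv := (pvEvGet? ev "detail").getD ""
  let e2 := e1.insert "detail" (if dv = "" then e1.getD "detail" "" else dv)
  let lv := (pvEvGet? ev "log_file").getD ""
  let e3 := e2.insert "log_file" (if lv = "" then e2.getD "log_file" "" else lv)
  let e4 := e3.insert "ts" ((pvEvGet? ev "ts").getD (e3.getD "ts" ""))
  if pvEvGet? ev "status" = some "running" then e4.insert "started_ts" ((pvEvGet? ev "ts").getD "") else e4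

-- one iteration of A's `for ev in events` loop
def pvAStep (jobs : PySem.Dict String (PySem.Dict String String)) (ev : List (String × String)) :
    PySem.Dict String (PySem.Dict String String) :=
  let jid := pvKey ev
  if jid = "" then jobs
  else match jobs.get? jid with
    | none => jobs.insert jid (pvAInit jid ev)
    | some existing => jobs.insert jid (pvAUpd existing ev)

def consolidate_jobs_py (events : List (List (String × String))) : List (List (String × String)) :=
  let jobs := events.foldl pvAStep PySem.Dict.empty
  let result := jobs.values
  -- j["status"] / j["ts"] are always present on stored jobs, so getD "" is exact
  let running := result.filter (fun j => j.getD "status" "" == "running")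
  let others := result.filter (fun j => !(j.getD "status" "" == "running"))
  let others2 := PySem.List.sorted others (fun j => j.getD "ts" "") true
  (running ++ others2).map (fun j => j.items)

-- ===== PORT B =====
-- `for ev in reversed(group): if key in ev: return ev[key]` / `return None`
def pvScanVal (k : String) : List (List (String × String)) → Option String
  | [] => none
  | ev :: rest =>
    match pvEvGet? ev k with
    | some v => some v
    | none => pvScanVal k rest

-- `for ev in reversed(group): v = ev.get(key); if v: return v` / `return ""`
def pvScanTruthy (k : String) : List (List (String × String)) → String
  | [] => ""
  | ev :: rest =>
    let v := (pvEvGet? ev k).getD ""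
    if v = "" then pvScanTruthy k rest else v

-- `for ev in reversed(group): if ev.get("status") == "running": return ev.get("ts", "")` / `return ""`
def pvScanStart : List (List (String × String)) → String
  | [] => ""
  | ev :: rest =>
    if pvEvGet? ev "status" = some "running" then (pvEvGet? ev "ts").getD "" else pvScanStart rest

-- one job's output dict, built field by field from its event list.
-- group[0] is ported as headD []: B only reaches it for a jid that occurs, so group ≠ [].
def pvBJob (jid : String) (events : List (List (String × String))) : List (String × String) :=
  let group := events.filter (fun ev => pvKey ev == jid)
  [("job_id", jid),
   ("job_type", (pvEvGet? (group.headD []) "job_type").getD "?"),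
   ("status", (pvScanVal "status" group.reverse).getD "?"),
   ("detail", pvScanTruthy "detail" group.reverse),
   ("log_file", pvScanTruthy "log_file" group.reverse),
   ("ts", (pvScanVal "ts" group.reverse).getD ""),
   ("started_ts", pvScanStart group.reverse)]

-- `if jid and jid not in order: order.append(jid)` — membership test + append is PySem.Set.add
def pvOrderStep (order : PySem.Set String) (ev : List (String × String)) : PySem.Set String :=
  let jid := pvKey ev
  if jid = "" then order else PySem.Set.add order jid

def consolidate_jobs_py_alt (events : List (List (String × String))) : List (List (String × String)) :=
  let order := events.foldl pvOrderStep PySem.Set.empty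
  let result := order.foldl (fun res jid => res ++ [pvBJob jid events]) []
  let running := result.filter (fun j => (PySem.Dict.mk j).getD "status" "" == "running")
  let others := result.filter (fun j => !((PySem.Dict.mk j).getD "status" "" == "running"))
  let others2 := PySem.List.sorted others (fun j => (PySem.Dict.mk j).getD "ts" "") true
  running ++ others2

-- ===== PRECONDITION & SPEC =====
def Spec_consolidate_jobs_py (events : List (List (String × String))) (out : List (List (String × String))) : Prop := out = consolidate_jobs_py_alt events
instance (events : List (List (String × String))) (out : List (List (String × String))) : Decidable (Spec_consolidate_jobs_py events out) := by unfold Spec_consolidate_jobs_py; infer_instance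

-- ===== CLAIM (what is proved, stated in full; the proofs are below) =====
def Claim_equal_consolidate_jobs_py : Prop := ∀ (events : List (List (String × String))), Dom_consolidate_jobs_py events → Spec_consolidate_jobs_py events (consolidate_jobs_py events)

-- ===== LEMMAS AND PROOFS =====

def pvANew (d : PySem.Dict String (PySem.Dict String String)) (ev : List (String × String)) :
    PySem.Dict String String :=
  match d.get? (pvKey ev) with
  | none => pvAInit (pvKey ev) ev
  | some existing => pvAUpd existing ev

-- A's guarded loop body = filter + unconditional insert
lemma pvAStep_filter (l : List (List (String × String))) (d0 : PySem.Dict String (PySem.Dict String String)) :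
    l.foldl pvAStep d0
      = (l.filter (fun ev => !(pvKey ev == ""))).foldl
          (fun d ev => d.insert (pvKey ev) (pvANew d ev)) d0 := by
  induction l generalizing d0 with
  | nil => rfl
  | cons ev l ih =>
    by_cases h : pvKey ev = ""
    · have hstep : pvAStep d0 ev = d0 := by simp [pvAStep, h]
      simp only [List.filter_cons, List.foldl_cons, hstep]
      simp [ih, h]
    · have hstep : pvAStep d0 ev = d0.insert (pvKey ev) (pvANew d0 ev) := by
        simp only [pvAStep, pvANew] at *
        cases hg : d0.get? (pvKey ev) <;> simp_all
      simp only [List.filter_cons, List.foldl_cons, hstep]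
      simp [ih, h]

-- B's guarded dedup loop = filter + Set.update
lemma pvOrder_filter (l : List (List (String × String))) (s : PySem.Set String) :
    l.foldl pvOrderStep s
      = PySem.Set.update s ((l.filter (fun ev => !(pvKey ev == ""))).map pvKey) := by
  induction l generalizing s with
  | nil => rfl
  | cons ev l ih =>
    by_cases h : pvKey ev = ""
    · have hstep : pvOrderStep s ev = s := by simp [pvOrderStep, h]
      simp only [List.filter_cons, List.foldl_cons, hstep]
      simp [ih, h]
    · have hstep : pvOrderStep s ev = PySem.Set.add s (pvKey ev) := by simp [pvOrderStep, h]
      simp only [List.filter_cons, List.foldl_cons, hstep]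
      simp only [ih]
      simp [PySem.Set.update, h]

-- A's partial-result dict looked up at k IS the fold of A's update over the k-group
lemma pvGetA (l : List (List (String × String))) (k : String) :
    ((l.foldl (fun d ev => d.insert (pvKey ev) (pvANew d ev)) PySem.Dict.empty).get? k)
      = match l.filter (fun ev => pvKey ev == k) with
        | [] => none
        | e :: rest => some (rest.foldl pvAUpd (pvAInit k e)) := by
  induction l using List.reverseRecOn with
  | nil => simp [PySem.Dict.get?_empty]
  | append_singleton l ev ih =>
    rw [List.foldl_append, List.filter_append]
    simp only [List.foldl]
    by_cases hk : k = pvKey ev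
    · subst hk
      rw [PySem.Dict.get?_insert_self]
      rw [pvANew, ih]
      cases hf : List.filter (fun ev_1 => pvKey ev_1 == pvKey ev) l <;>
        simp [List.foldl_append]
    · rw [PySem.Dict.get?_insert_of_ne _ _ hk, ih]
      have : (pvKey ev == k) = false := by
        simp only [beq_eq_false_iff_ne, ne_eq]; exact fun h => hk h.symm
      simp [this]

-- the fields of B's job literal, as a function of the (nonempty) group
def pvJob (k : String) (g : List (List (String × String))) : List (String × String) :=
  [("job_id", k),
   ("job_type", (pvEvGet? (g.headD []) "job_type").getD "?"),
   ("status", (pvScanVal "status" g.reverse).getD "?"),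
   ("detail", pvScanTruthy "detail" g.reverse),
   ("log_file", pvScanTruthy "log_file" g.reverse),
   ("ts", (pvScanVal "ts" g.reverse).getD ""),
   ("started_ts", pvScanStart g.reverse)]

-- scanning one more (later) event: first hit wins
lemma pvScanVal_cons (k : String) (ev : List (String × String)) (rest : List (List (String × String))) :
    pvScanVal k (ev :: rest) = (pvEvGet? ev k).or (pvScanVal k rest) := by
  cases h : pvEvGet? ev k <;> simp [pvScanVal, h]

lemma pvOr_getD (a b : Option String) (c : String) :
    (a.or b).getD c = a.getD (b.getD c) := by
  cases a <;> simp

-- A's update of a stored job literal, field by field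
lemma pvAUpd_mk (a1 a2 a3 a4 a5 a6 a7 : String) (ev : List (String × String)) :
    pvAUpd (PySem.Dict.mk [("job_id",a1),("job_type",a2),("status",a3),("detail",a4),("log_file",a5),("ts",a6),("started_ts",a7)]) ev
    = PySem.Dict.mk [("job_id",a1),("job_type",a2),
        ("status",(pvEvGet? ev "status").getD a3),
        ("detail", if (pvEvGet? ev "detail").getD "" = "" then a4 else (pvEvGet? ev "detail").getD ""),
        ("log_file", if (pvEvGet? ev "log_file").getD "" = "" then a5 else (pvEvGet? ev "log_file").getD ""),
        ("ts",(pvEvGet? ev "ts").getD a6),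
        ("started_ts", if pvEvGet? ev "status" = some "running" then (pvEvGet? ev "ts").getD "" else a7)] := by
  simp only [pvAUpd]
  split_ifs with h <;>
    simp [PySem.Dict.insert, PySem.Dict.contains, PySem.Dict.getD, PySem.Dict.get?]

-- the heart: A's fold over a group equals B's field-by-field reverse scans
lemma pvFold_eq_job (k : String) (e : List (String × String)) (rest : List (List (String × String))) :
    rest.foldl pvAUpd (pvAInit k e) = PySem.Dict.mk (pvJob k (e :: rest)) := by
  induction rest using List.reverseRecOn with
  | nil =>
    simp only [List.foldl_nil, pvAInit, pvJob, List.reverse_cons, List.reverse_nil,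
      List.nil_append, List.headD_cons, pvScanVal_cons, pvScanVal, pvScanTruthy, pvScanStart,
      Option.or_none]
    split_ifs <;> simp_all
  | append_singleton rest ev ih =>
    rw [List.foldl_append, List.foldl_cons, List.foldl_nil, ih]
    rw [pvJob, pvAUpd_mk, pvJob]
    simp only [List.reverse_cons, List.reverse_append, List.reverse_nil, List.nil_append, List.cons_append, List.headD_cons, pvScanVal_cons, pvScanTruthy,
      pvScanStart, pvOr_getD]

-- B's job literal is pvJob of the filtered group, by definition
lemma pvBJob_eq_pvJob (jid : String) (events : List (List (String × String))) :
    pvBJob jid events = pvJob jid (events.filter (fun ev => pvKey ev == jid)) := rfl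

lemma pvResult_eq (events : List (List (String × String))) :
    (events.foldl pvAStep PySem.Dict.empty).values
      = (events.foldl pvOrderStep PySem.Set.empty).map
          (fun jid => PySem.Dict.mk (pvBJob jid events)) := by
  rw [pvAStep_filter, pvOrder_filter]
  set l := events.filter (fun ev => !(pvKey ev == "")) with hl
  have hndA : (l.foldl (fun d ev => d.insert (pvKey ev) (pvANew d ev)) PySem.Dict.empty).keys.Nodup :=
    PySem.Dict.nodup_keys_foldl_insert_key l pvKey pvANew PySem.Dict.empty PySem.Dict.nodup_keys_empty
  have hkeys : (l.foldl (fun d ev => d.insert (pvKey ev) (pvANew d ev)) PySem.Dict.empty).keys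
      = PySem.Set.update PySem.Set.empty (l.map pvKey) := by
    rw [PySem.Dict.keys_foldl_insert_key l pvKey pvANew, PySem.Dict.keys_empty]; rfl
  rw [PySem.Dict.values_eq_map_keys _ hndA PySem.Dict.empty, hkeys]
  apply List.map_congr_left
  intro k hk
  have hk' : k ∈ PySem.Set.ofList (l.map pvKey) := hk
  rw [PySem.Set.mem_ofList] at hk'
  obtain ⟨ev, hev, hkey⟩ := List.mem_map.mp hk'
  have hkne : ¬ (k = "") := by
    have h2 := (List.mem_filter.mp hev).2
    subst hkey; simpa using h2
  have hgroup : events.filter (fun ev => pvKey ev == k) = l.filter (fun ev => pvKey ev == k) := by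
    rw [hl, List.filter_filter]
    apply List.filter_congr
    intro x _
    by_cases hx : pvKey x = k
    · simp [hx, hkne]
    · simp [hx]
  have hne : l.filter (fun ev' => pvKey ev' == k) ≠ [] :=
    List.ne_nil_of_mem (List.mem_filter.mpr ⟨hev, by simp [hkey]⟩)
  rw [PySem.Dict.getD_eq_get?_getD, pvGetA]
  cases hf : l.filter (fun ev' => pvKey ev' == k) with
  | nil => exact absurd hf hne
  | cons e rest =>
    simp only [Option.getD_some]
    rw [pvFold_eq_job, pvBJob_eq_pvJob, hgroup, hf]

-- insertion commutes with mapping when the comparison factors through the map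
lemma pvInsertBy_map {α β : Type} (f : α → β) (before : β → β → Bool) (x : α) (ys : List α) :
    PySem.List.insertBy before (f x) (ys.map f)
      = (PySem.List.insertBy (fun a b => before (f a) (f b)) x ys).map f := by
  induction ys with
  | nil => rfl
  | cons y t ih =>
    simp only [List.map_cons, PySem.List.insertBy]
    by_cases h : before (f x) (f y) <;> simp [h, ih]

lemma pvFoldIns_map {α β : Type} (f : α → β) (before : β → β → Bool) (xs : List α) (acc : List α) :
    (xs.map f).foldl (fun acc x => PySem.List.insertBy before x acc) (acc.map f)
      = (xs.foldl (fun acc x => PySem.List.insertBy (fun a b => before (f a) (f b)) x acc) acc).map f := by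
  induction xs generalizing acc with
  | nil => rfl
  | cons x t ih =>
    simp only [List.map_cons, List.foldl_cons, pvInsertBy_map]
    exact ih _

-- sorted commutes with mapping a function the key factors through
lemma pvSorted_map {α β : Type} {κ : Type} [LinearOrder κ] (f : α → β) (key : β → κ) (rev : Bool)
    (xs : List α) :
    PySem.List.sorted (xs.map f) key rev = (PySem.List.sorted xs (fun x => key (f x)) rev).map f := by
  cases rev <;>
    simpa [PySem.List.sorted] using pvFoldIns_map f _ xs []

-- ===== VERDICT (by name: the statement is the Claim_ definition above) =====
theorem consolidate_jobs_py_spec : Claim_equal_consolidate_jobs_py := by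
  intro events _
  show consolidate_jobs_py events = consolidate_jobs_py_alt events
  simp only [consolidate_jobs_py, consolidate_jobs_py_alt]
  rw [pvResult_eq, PySem.List.foldl_append_singleton_eq_map, List.nil_append]
  simp only [List.filter_map, pvSorted_map, List.map_map, ← List.map_append, Function.comp_def]
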